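-- pv_equiv track=rewrite | github.com/UT-CHG/pyDCI | src/pydci/consistent_bayes/SplitSequentialProblem.py | _create_binary_string
-- ===== SOURCE A (Python) =====
-- def _create_binary_string(lst, max_int):
--     binary_string = ""
--     for i in range(max_int):
--         if i in lst:
--             binary_string += "1"
--         else:
--             binary_string += "0"
--     return binary_string
-- ===== SOURCE B (Python) =====
-- def _create_binary_string(lst, max_int):
--     # Scatter: write '1' into an indexed buffer for each in-range element, instead of
--     # scanning the whole list once per position.
--     chars = ["0"] * max_int
--     for x in lst:
--         if 0 <= x < max_int:
--             chars[int(x)] = "1"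
--     return "".join(chars)
-- ===== Notes on version B (the rewrite author's own statement) =====
-- stated objective: faster
-- what changed: Instead of testing 'i in lst' for every i in range(max_int) (a gather with an inner list scan), B allocates a '0' buffer of length max_int once and scatters '1' at the index of each in-range element of lst, then joins.
import Mathlib
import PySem

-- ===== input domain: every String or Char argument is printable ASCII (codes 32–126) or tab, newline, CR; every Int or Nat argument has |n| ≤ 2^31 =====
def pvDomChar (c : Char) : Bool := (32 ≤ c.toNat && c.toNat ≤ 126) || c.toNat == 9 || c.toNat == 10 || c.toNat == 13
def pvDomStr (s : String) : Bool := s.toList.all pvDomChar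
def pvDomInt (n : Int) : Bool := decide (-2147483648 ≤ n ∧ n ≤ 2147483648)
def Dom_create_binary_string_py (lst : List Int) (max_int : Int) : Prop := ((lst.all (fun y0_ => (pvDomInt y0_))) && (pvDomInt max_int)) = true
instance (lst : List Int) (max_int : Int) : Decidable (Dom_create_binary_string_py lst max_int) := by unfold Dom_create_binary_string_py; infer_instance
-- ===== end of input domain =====

-- B scatters '1' into a pre-allocated buffer indexed by value instead of scanning lst for every
-- position of range(max_int): asymptotically faster (O(max_int+len) vs O(max_int*len)).


-- ===== PORT A =====
def create_binary_string_py (lst : List Int) (max_int : Int) : String :=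
  (PySem.List.pyRange 0 max_int 1).foldl
    (fun binary_string i =>
      if lst.contains i then binary_string ++ "1" else binary_string ++ "0") ""

-- ===== PORT B =====
def create_binary_string_py_alt (lst : List Int) (max_int : Int) : String :=
  let chars := List.replicate max_int.toNat '0'
  let chars := lst.foldl
    (fun chars x => if 0 ≤ x ∧ x < max_int then chars.set x.toNat '1' else chars) chars
  String.ofList chars

-- ===== PRECONDITION & SPEC =====
def Spec_create_binary_string_py (lst : List Int) (max_int : Int) (out : String) : Prop := out = create_binary_string_py_alt lst max_int
instance (lst : List Int) (max_int : Int) (out : String) : Decidable (Spec_create_binary_string_py lst max_int out) := by unfold Spec_create_binary_string_py; infer_instance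

-- ===== CLAIM (what is proved, stated in full; the proofs are below) =====
def Claim_equal_create_binary_string_py : Prop := ∀ (lst : List Int) (max_int : Int), Dom_create_binary_string_py lst max_int → Spec_create_binary_string_py lst max_int (create_binary_string_py lst max_int)

-- ===== LEMMAS AND PROOFS =====

-- A's loop appends one char per range element: the result's char list is the map.
lemma pvFoldA (lst : List Int) :
    ∀ (L : List Int) (s : String),
    (L.foldl (fun s i => if lst.contains i then s ++ "1" else s ++ "0") s).toList =
      s.toList ++ L.map (fun i => if lst.contains i then '1' else '0')
  | [], s => by simp
  | i :: L, s => by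
    rw [List.foldl_cons, pvFoldA lst L]
    by_cases h : i ∈ lst <;> simp [h]

-- Element-wise characterisation of B's scatter loop.
lemma pvScatter (m : Int) :
    ∀ (L : List Int) (c : List Char), c.length = m.toNat → ∀ (k : Nat),
    getElem? (L.foldl (fun c x => if 0 ≤ x ∧ x < m then c.set x.toNat '1' else c) c) k =
      if ((k : Int) ∈ L ∧ (k : Int) < m) then some '1' else getElem? c k
  | [], c, hc, k => by simp
  | x :: L, c, hc, k => by
    rw [List.foldl_cons,
      pvScatter m L _ (by split <;> simp [hc]) k]
    by_cases hL : (k : Int) ∈ L ∧ (k : Int) < m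
    · rw [if_pos hL, if_pos ⟨List.mem_cons.mpr (Or.inr hL.1), hL.2⟩]
    · rw [if_neg hL]
      by_cases hx : x = (k : Int) ∧ (k : Int) < m
      · have hk : k < c.length := by
          rw [hc]; omega
        have hx1 := hx.1
        have hx2 := hx.2
        rw [if_pos (show (0:Int) ≤ x ∧ x < m from ⟨by omega, by omega⟩),
          if_pos (show (k:Int) ∈ x :: L ∧ (k:Int) < m from
            ⟨List.mem_cons.mpr (Or.inl hx1.symm), hx2⟩)]
        simp [hx1, hk]
      · have hR : ¬ ((k : Int) ∈ x :: L ∧ (k : Int) < m) := by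
          intro ⟨h1, h2⟩
          rcases List.mem_cons.mp h1 with h | h
          · exact hx ⟨h.symm, h2⟩
          · exact hL ⟨h, h2⟩
        rw [if_neg hR]
        split
        · next hg =>
          have hne : x.toNat ≠ k := by omega
          simp [hne]
        · rfl

-- ===== VERDICT (by name: the statement is the Claim_ definition above) =====
theorem create_binary_string_py_spec : Claim_equal_create_binary_string_py := by
  intro lst max_int _
  unfold Spec_create_binary_string_py create_binary_string_py create_binary_string_py_alt
  apply String.toList_inj.mp
  rw [pvFoldA, PySem.List.pyRange_one]
  simp only [String.toList_ofList]
  apply List.ext_getElem?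
  intro k
  rw [pvScatter max_int lst _ (by simp)]
  simp only [List.map_map]
  by_cases hk : k < (max_int - 0).toNat
  · have hkm : (k : Int) < max_int := by omega
    simp [hkm, Function.comp]
    by_cases hmem : (k : Int) ∈ lst <;> simp [hmem]
  · have hkm : ¬ ((k : Int) < max_int) := by omega
    simp [hkm]
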